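-- pv_equiv track=rewrite | github.com/AdamZhouSE/pythonHomework | Code/CodeRecords/2668/48102/261772.py | search
-- ===== SOURCE A (Python) =====
-- def search(num: int) -> int:
--     table = [2**i-1 for i in range(1, 32)]
--     left = 0
--     right = 31
--     while left < right:
--         mid = (left + right) >> 1
--         if table[mid] >= num:
--             right = mid
--         else:
--             left = mid + 1
--     return table[left]
-- ===== SOURCE B (Python) =====
-- def search(num: int) -> int:
--     if num <= 1:
--         return 1
--     return 2 ** num.bit_length() - 1
-- ===== Notes on version B (the rewrite author's own statement) =====
-- stated objective: simpler
-- what changed: Replaces the 31-entry table plus binary-search loop with a closed form via num.bit_length(), returning the smallest value of the form 2^i-1 that is >= num directly.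
import Mathlib
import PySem

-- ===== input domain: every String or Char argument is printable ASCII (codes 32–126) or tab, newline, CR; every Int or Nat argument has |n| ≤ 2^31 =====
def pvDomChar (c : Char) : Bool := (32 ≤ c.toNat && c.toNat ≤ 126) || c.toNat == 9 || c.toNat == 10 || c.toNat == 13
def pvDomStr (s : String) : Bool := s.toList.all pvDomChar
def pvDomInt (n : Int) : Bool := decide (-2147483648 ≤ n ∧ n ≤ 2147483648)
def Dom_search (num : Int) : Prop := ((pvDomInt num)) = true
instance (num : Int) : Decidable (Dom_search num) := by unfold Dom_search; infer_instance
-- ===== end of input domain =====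

-- B replaces A's table + binary-search loop by the closed form (1 << num.bit_length()) - 1
-- (with 1 for num <= 1): a constant-factor simplification, identical return values on Pre_.

-- ===== PORT A =====
-- table = [2**i-1 for i in range(1, 32)]
def pvTable : List Int := (PySem.List.pyRange 1 32 1).map (fun i => 2 ^ i.toNat - 1)

-- the while loop; left/right stay in 0..31 so Nat carries them; table[mid] is in range
-- whenever the loop body runs (mid < right ≤ 31), so pyGetD's default is never read.
def searchLoop (num : Int) (left right : Nat) : Nat :=
  if left < right then
    let mid := (left + right) >>> 1
    if PySem.List.pyGetD pvTable (mid : Int) 0 ≥ num then searchLoop num left mid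
    else searchLoop num (mid + 1) right
  else left
termination_by right - left
decreasing_by all_goals (simp only [Nat.shiftRight_eq_div_pow, pow_one] at *; omega)

-- final 'return table[left]' (IndexError when left = 31, excluded by Pre_search)
def search (num : Int) : Int :=
  PySem.List.pyGetD pvTable ((searchLoop num 0 31 : Nat) : Int) 0

-- ===== PORT B =====
def search_alt (num : Int) : Int :=
  if num ≤ 1 then 1
  else 2 ^ PySem.Int.bitLength num - 1

-- ===== PRECONDITION & SPEC =====
-- Pre_ excludes num > 2^31-1: there A's final table[left] raises IndexError (left = 31).
def Pre_search (num : Int) : Prop := num ≤ 2147483647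
instance (num : Int) : Decidable (Pre_search num) := by unfold Pre_search; infer_instance
def pvWitness_search : Int := 100

def Spec_search (num : Int) (out : Int) : Prop := out = search_alt num
instance (num : Int) (out : Int) : Decidable (Spec_search num out) := by unfold Spec_search; infer_instance

-- ===== CLAIM (what is proved, stated in full; the proofs are below) =====
def Claim_equal_search : Prop := ∀ (num : Int), Dom_search num → Pre_search num → Spec_search num (search num)

-- ===== LEMMAS AND PROOFS =====

lemma table_get (j : Nat) (h : j < 31) :
    PySem.List.pyGetD pvTable (j : Int) 0 = 2 ^ (j + 1) - 1 := by
  have h' : j < ((32 : Int) - 1).toNat := by omega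
  rw [pvTable, PySem.List.pyGetD_map_pyRange_one _ 1 32 j 0 h']
  norm_num
  omega

lemma loop_eq (num : Int) (t : Nat)
    (hP : ∀ i : Nat, ((2 : Int) ^ (i + 1) - 1 ≥ num) ↔ t ≤ i) :
    ∀ n l r : Nat, r - l ≤ n → l ≤ t → t ≤ r → r ≤ 31 → searchLoop num l r = t := by
  intro n
  induction n with
  | zero =>
    intro l r hn hl hr h31
    rw [searchLoop]
    have : ¬ l < r := by omega
    simp only [this, if_false]
    omega
  | succ n ih =>
    intro l r hn hl hr h31
    rw [searchLoop]
    by_cases hlr : l < r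
    · simp only [hlr, if_true]
      have hmid : (l + r) >>> 1 = (l + r) / 2 := by
        simp [Nat.shiftRight_eq_div_pow]
      have hmb : l ≤ (l + r) >>> 1 ∧ (l + r) >>> 1 < r := by rw [hmid]; omega
      have h31' : (l + r) >>> 1 < 31 := by omega
      rw [table_get _ h31']
      by_cases hc : (2 : Int) ^ ((l + r) >>> 1 + 1) - 1 ≥ num
      · simp only [hc, if_true]
        exact ih l ((l + r) >>> 1) (by omega) hl ((hP _).mp hc) (by omega)
      · simp only [hc, if_false]
        have : t ≥ (l + r) >>> 1 + 1 := by
          have := (hP ((l + r) >>> 1)).mpr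
          omega
        exact ih ((l + r) >>> 1 + 1) r (by omega) this hr h31
    · simp only [hlr, if_false]
      omega

-- ===== VERDICT (by name: the statement is the Claim_ definition above) =====
theorem search_spec : Claim_equal_search := by
  intro num _ hpre
  unfold Spec_search search search_alt Pre_search at *
  by_cases h1 : num ≤ 1
  · -- t = 0 : every table entry is ≥ num
    have hP : ∀ i : Nat, ((2 : Int) ^ (i + 1) - 1 ≥ num) ↔ 0 ≤ i := by
      intro i
      have hpow : (1 : Int) ≤ 2 ^ i := one_le_pow₀ (by norm_num)
      have : (2 : Int) ^ (i + 1) = 2 ^ i * 2 := pow_succ 2 i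
      constructor
      · intro _; omega
      · intro _; omega
    rw [loop_eq num 0 hP 31 0 31 (by omega) (by omega) (by omega) (by omega)]
    rw [table_get 0 (by omega)]
    simp [h1]
  · -- num ≥ 2 : t = bitLength num - 1
    push Not at h1
    have hnum2 : (2 : Int) ≤ num := by omega
    set b := PySem.Int.bitLength num with hb
    have hub : num.natAbs < 2 ^ b := PySem.Int.lt_two_pow_bitLength num
    have hlb : 2 ^ (b - 1) ≤ num.natAbs := PySem.Int.two_pow_bitLength_le num (by omega)
    have habs : (num.natAbs : Int) = num := Int.natAbs_of_nonneg (by omega)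
    have hb2 : 2 ≤ b := by
      by_contra hcon
      interval_cases b <;> omega
    have hP : ∀ i : Nat, ((2 : Int) ^ (i + 1) - 1 ≥ num) ↔ b - 1 ≤ i := by
      intro i
      constructor
      · intro hge
        by_contra hcon
        push Not at hcon
        have hle : i + 1 ≤ b - 1 := by omega
        have : (2 : Nat) ^ (i + 1) ≤ 2 ^ (b - 1) := Nat.pow_le_pow_right (by omega) hle
        have hn : num.natAbs < 2 ^ (i + 1) := by
          have : (num.natAbs : Int) < 2 ^ (i + 1) := by
            rw [habs]; omega
          exact_mod_cast this
        omega
      · intro hle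
        have : (2 : Nat) ^ b ≤ 2 ^ (i + 1) := Nat.pow_le_pow_right (by omega) (by omega)
        have hn : num.natAbs < 2 ^ (i + 1) := by omega
        have : (num.natAbs : Int) < 2 ^ (i + 1) := by exact_mod_cast hn
        omega
    have hbsmall : b - 1 ≤ 30 := by
      by_contra hcon
      push Not at hcon
      have : (2 : Nat) ^ 31 ≤ 2 ^ (b - 1) := Nat.pow_le_pow_right (by omega) (by omega)
      have : num.natAbs ≤ 2147483647 := by omega
      omega
    rw [loop_eq num (b - 1) hP 31 0 31 (by omega) (by omega) (by omega) (by omega)]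
    rw [table_get (b - 1) (by omega)]
    have hnle : ¬ num ≤ 1 := by omega
    simp only [hnle, if_false]
    have hbb : b - 1 + 1 = b := by omega
    rw [hbb]
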